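-- pv_equiv track=rewrite | github.com/Raihan9797/data-structures-and-algos-practice | min_max_array.py | solve
-- ===== SOURCE A (Python) =====
-- def solve(arr):
--     sorted_arr = sorted(arr) # [7,10,11,12,15]
--     length = len(arr) # 5
--     is_even = length % 2 == 0
--     end = int(length / 2) if is_even else int(length /2 +1)
--     ans = []
--
--     for i in range(0, end):
--         if (i == end-1 and not is_even):
--             ans.append(sorted_arr[i])
--             break
--         ans.append(sorted_arr[length-i-1])
--         ans.append(sorted_arr[i])
--     return ans
-- ===== SOURCE B (Python) =====
-- def solve(arr):
--     rest = list(arr)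
--     ans = []
--     take_max = True
--     while rest:
--         v = max(rest) if take_max else min(rest)
--         rest.remove(v)
--         ans.append(v)
--         take_max = not take_max
--     return ans
-- ===== Notes on version B (the rewrite author's own statement) =====
-- stated objective: alternative
-- what changed: Replaces A's sort-then-index-from-both-ends loop by a sort-free selection algorithm: repeatedly extract the maximum and the minimum of the remaining elements, alternating, until the list is empty.
import Mathlib
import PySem

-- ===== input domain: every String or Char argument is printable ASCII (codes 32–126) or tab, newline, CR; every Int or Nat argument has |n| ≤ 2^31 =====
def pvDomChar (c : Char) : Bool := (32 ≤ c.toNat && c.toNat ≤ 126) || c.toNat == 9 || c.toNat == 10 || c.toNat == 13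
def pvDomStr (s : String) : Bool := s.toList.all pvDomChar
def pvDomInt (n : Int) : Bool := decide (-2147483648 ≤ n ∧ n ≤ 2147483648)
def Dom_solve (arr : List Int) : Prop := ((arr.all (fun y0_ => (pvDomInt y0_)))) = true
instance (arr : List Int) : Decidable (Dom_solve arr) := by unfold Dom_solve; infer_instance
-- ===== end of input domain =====

-- B replaces A's sort-then-index-from-both-ends loop by a sort-free selection loop
-- (repeatedly extract the max, then the min, of the remaining elements); objective: alternative.

-- ===== PORT A =====
-- The for-loop with its break, as a structural recursion on the range index i.
-- All list indices A computes are nonnegative and in range (proved in the lemmas below),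
-- so `List.getD _ 0` is exact for Python's sorted_arr[...] here.
def solveLoop (s : List Int) (n e : Nat) (evn : Bool) (i : Nat) : List Int :=
  if i < e then
    if i = e - 1 ∧ evn = false then [s.getD i 0]   -- append middle, then break
    else s.getD (n - i - 1) 0 :: s.getD i 0 :: solveLoop s n e evn (i + 1)
  else []
termination_by e - i

def solve (arr : List Int) : List Int :=
  let s := PySem.List.sorted arr (fun x => x) false
  let n := arr.length
  let evn := n % 2 == 0
  -- int(n/2) resp. int(n/2 + 1): float arithmetic is exact here and truncation of the
  -- nonnegative value equals Nat division: n/2, resp. n/2 + 1 for odd n.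
  let e := if evn then n / 2 else n / 2 + 1
  solveLoop s n e evn 0

-- ===== PORT B =====
-- Termination of B's while-loop: each iteration removes one element of `rest`.
theorem removeGetD_length_lt (xs : List Int) (v : Int) (h : xs ≠ []) :
    ((PySem.List.remove? xs v).getD []).length < xs.length := by
  cases hr : PySem.List.remove? xs v with
  | none => simpa using List.length_pos_iff.mpr h
  | some r =>
    have hv : v ∈ xs := by
      by_contra hnv
      rw [(PySem.List.remove?_eq_none_iff xs v).mpr hnv] at hr
      cases hr
    rw [PySem.List.remove?_eq_some_erase xs v hv] at hr
    cases hr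
    have := List.length_erase_of_mem hv
    have := List.length_pos_iff.mpr h
    simp only [Option.getD_some]
    omega

-- B's while-loop. v = max/min of the nonempty `rest` is always a member, so
-- max?/min? and remove? are `some` here and the `getD` defaults are never taken (exact).
def solveAltLoop (rest : List Int) (takeMax : Bool) : List Int :=
  if h : rest = [] then []
  else
    let v := if takeMax then (PySem.List.max? rest (fun y => y)).getD 0
             else (PySem.List.min? rest (fun y => y)).getD 0
    v :: solveAltLoop ((PySem.List.remove? rest v).getD []) (!takeMax)
termination_by rest.length
decreasing_by exact removeGetD_length_lt rest _ h

def solve_alt (arr : List Int) : List Int := solveAltLoop arr true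

-- ===== PRECONDITION & SPEC =====
def Spec_solve (arr : List Int) (out : List Int) : Prop := out = solve_alt arr
instance (arr : List Int) (out : List Int) : Decidable (Spec_solve arr out) := by unfold Spec_solve; infer_instance

-- ===== CLAIM (what is proved, stated in full; the proofs are below) =====
def Claim_equal_solve : Prop := ∀ (arr : List Int), Dom_solve arr → Spec_solve arr (solve arr)

-- ===== LEMMAS AND PROOFS =====

-- The common normal form both ports are reduced to: interleave the reversed and the
-- plain sorted list, truncated to the original length.
def Fspec (s : List Int) : List Int :=
  ((s.reverse.zip s).flatMap (fun p => [p.1, p.2])).take s.length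

theorem flat_length (l : List (Int × Int)) :
    (l.flatMap (fun p => [p.1, p.2])).length = 2 * l.length := by
  induction l with
  | nil => simp
  | cons p t ih => simp [ih]; omega

theorem flat_get (l : List (Int × Int)) (j : Nat) (hj : j < l.length) :
    (l.flatMap (fun p => [p.1, p.2]))[2 * j]? = some (l[j].1) ∧
    (l.flatMap (fun p => [p.1, p.2]))[2 * j + 1]? = some (l[j].2) := by
  induction l generalizing j with
  | nil => simp at hj
  | cons p t ih =>
    cases j with
    | zero => simp
    | succ j =>
      have hj' : j < t.length := by simpa using hj
      have h2 : 2 * (j + 1) = (2 * j + 1) + 1 := by ring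
      rw [h2]
      simpa using ih j hj'

-- A's loop from index i produces exactly the tail of the truncated interleave.
theorem loop_eq (s : List Int) (n e : Nat) (evn : Bool)
    (hn : n = s.length) (hev : evn = decide (n % 2 = 0))
    (he : e = if evn then n / 2 else n / 2 + 1) :
    ∀ d i, e - i = d →
      solveLoop s n e evn i =
        (((s.reverse.zip s).flatMap (fun p => [p.1, p.2])).take n).drop (2 * i) := by
  have hF : ((s.reverse.zip s).flatMap (fun p => [p.1, p.2])).length = 2 * n := by
    rw [flat_length]; simp [hn]
  have hL : ((((s.reverse.zip s)).flatMap (fun p => [p.1, p.2])).take n).length = n := by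
    simp [hF]; omega
  have hzl : (s.reverse.zip s).length = n := by simp [hn]
  have hpar : evn = true ↔ n % 2 = 0 := by subst hev; simp
  intro d
  induction d with
  | zero =>
    intro i hi
    have hie : e ≤ i := by omega
    rw [solveLoop]
    have : ¬ i < e := by omega
    simp only [this, if_false]
    have h2e : n ≤ 2 * e := by
      by_cases hb : evn = true
      · have := hpar.mp hb; simp [hb] at he; omega
      · have : ¬ n % 2 = 0 := fun h => hb (hpar.mpr h)
        simp [Bool.eq_false_iff.mpr hb] at he
        · omega
    exact (List.drop_eq_nil_of_le (by omega)).symm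
  | succ d ih =>
    intro i hi
    have hilt : i < e := by omega
    rw [solveLoop]
    simp only [hilt, if_true]
    -- element facts at a generic in-range index j
    have getL : ∀ j, (hjn : j < n) →
        ((((s.reverse.zip s)).flatMap (fun p => [p.1, p.2])).take n)[j]'(by omega) =
        (if j % 2 = 0 then ((s.reverse.zip s)[j / 2]'(by omega)).1
         else ((s.reverse.zip s)[j / 2]'(by omega)).2) := by
      intro j hjn
      have hj2 : j / 2 < (s.reverse.zip s).length := by omega
      obtain ⟨h1, h2⟩ := flat_get (s.reverse.zip s) (j / 2) hj2
      rw [List.getElem_take]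
      by_cases hpar2 : j % 2 = 0
      · simp only [if_pos hpar2]
        have hj : j = 2 * (j / 2) := by omega
        refine Option.some_injective _ ?_
        rw [← List.getElem?_eq_getElem (by omega)]
        conv_lhs => rw [hj]
        exact h1
      · simp only [if_neg hpar2]
        have hj : j = 2 * (j / 2) + 1 := by omega
        refine Option.some_injective _ ?_
        rw [← List.getElem?_eq_getElem (by omega)]
        conv_lhs => rw [hj]
        exact h2
    by_cases hmid : i = e - 1 ∧ evn = false
    · -- odd middle element: n = 2*i + 1
      have hnod : ¬ n % 2 = 0 := by
        intro h; have := hpar.mpr h; rw [hmid.2] at this; cases this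
      have heo : e = n / 2 + 1 := by
        rw [he, hmid.2]; simp
      have h2i : 2 * i = n - 1 ∧ i < n := by
        obtain ⟨h1, _⟩ := hmid; omega
      rw [if_pos hmid]
      have hdrop : ((((s.reverse.zip s)).flatMap (fun p => [p.1, p.2])).take n).drop (2 * i) =
          [((((s.reverse.zip s)).flatMap (fun p => [p.1, p.2])).take n)[2 * i]'(by omega)] := by
        rw [List.drop_eq_getElem_cons (l := (((s.reverse.zip s)).flatMap (fun p => [p.1, p.2])).take n) (i := 2 * i) (by simp only [hL]; omega)]
        rw [List.drop_eq_nil_of_le (by omega)]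
      rw [hdrop, getL (2 * i) (by omega)]
      have hm : (2 * i) % 2 = 0 := by omega
      rw [if_pos hm]
      have hq : 2 * i / 2 = i := by omega
      simp only [hq]
      rw [List.getElem_zip, List.getElem_reverse]
      have hidx : s.length - 1 - i = i := by omega
      simp only [hidx]
      rw [List.getD_eq_getElem s 0 (show i < s.length by omega)]
    · -- general step: emit s[n-1-i], s[i], recurse
      simp only [hmid, if_false]
      have hstep : 2 * i + 1 < n := by
        by_cases hb : evn = true
        · have h0 := hpar.mp hb; rw [he, if_pos hb] at hilt; omega
        · have hbf : evn = false := by cases evn <;> simp_all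
          have h0 : ¬ n % 2 = 0 := fun h => by
            have := hpar.mpr h; rw [hbf] at this; cases this
          have hne : ¬ i = e - 1 := fun h => hmid ⟨h, hbf⟩
          rw [he, if_neg hb] at hilt hne
          omega
      have hrec := ih (i + 1) (by omega)
      rw [hrec]
      rw [List.drop_eq_getElem_cons (l := (((s.reverse.zip s)).flatMap (fun p => [p.1, p.2])).take n) (i := 2 * i) (by simp only [hL]; omega)]
      rw [List.drop_eq_getElem_cons (l := (((s.reverse.zip s)).flatMap (fun p => [p.1, p.2])).take n) (i := 2 * i + 1) (by simp only [hL]; omega)]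
      have h22 : 2 * (i + 1) = 2 * i + 1 + 1 := by ring
      rw [h22]
      congr 1
      · rw [getL (2 * i) (by omega)]
        have hm : (2 * i) % 2 = 0 := by omega
        rw [if_pos hm]
        have hq : 2 * i / 2 = i := by omega
        simp only [hq]
        rw [List.getElem_zip, List.getElem_reverse]
        have hidx : s.length - 1 - i = n - i - 1 := by omega
        simp only [hidx]
        rw [List.getD_eq_getElem s 0 (show n - i - 1 < s.length by omega)]
      · congr 1
        rw [getL (2 * i + 1) (by omega)]
        have hm : ¬ (2 * i + 1) % 2 = 0 := by omega
        rw [if_neg hm]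
        have hq : (2 * i + 1) / 2 = i := by omega
        simp only [hq]
        rw [List.getElem_zip]
        rw [List.getD_eq_getElem s 0 (show i < s.length by omega)]

-- ---- B-side lemmas ----

-- max(l) is the last element of sorted(l)
theorem max_eq_getLast_sorted (l ys : List Int) (hl : l ≠ [])
    (hys : PySem.List.sorted l (fun x => x) false = ys) (hy : ys ≠ []) :
    PySem.List.max? l (fun y => y) = some (ys.getLast hy) := by
  cases hm : PySem.List.max? l (fun y => y) with
  | none => exact absurd ((PySem.List.max?_eq_none_iff l _).mp hm) hl
  | some v =>
    congr 1
    have hvl : v ∈ l := PySem.List.max?_mem hm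
    have hvs : v ∈ ys := by
      rw [← hys]; exact (PySem.List.mem_sorted l _ false v).mpr hvl
    have hbl : ys.getLast hy ∈ l := by
      have h4 := PySem.List.mem_sorted l (fun x => x) false (ys.getLast hy)
      rw [hys] at h4
      exact h4.mp (List.getLast_mem hy)
    obtain ⟨p, hp, hpv⟩ := List.getElem_of_mem hvs
    have h1 : v ≤ ys.getLast hy := by
      rw [List.getLast_eq_getElem, ← hpv]
      have hmono := PySem.List.sorted_id_getElem_mono l
        (p := p) (q := ys.length - 1) (by omega) (by rw [hys]; omega)
      simpa [hys] using hmono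
    exact le_antisymm h1 (PySem.List.max?_isMax hm _ hbl)

-- min(l) is the first element of sorted(l)
theorem min_eq_head_sorted (l ys : List Int) (hl : l ≠ [])
    (hys : PySem.List.sorted l (fun x => x) false = ys) (hy : ys ≠ []) :
    PySem.List.min? l (fun y => y) = some (ys.head hy) := by
  cases hm : PySem.List.min? l (fun y => y) with
  | none => exact absurd ((PySem.List.min?_eq_none_iff l _).mp hm) hl
  | some v =>
    congr 1
    have hvl : v ∈ l := PySem.List.min?_mem hm
    have hvs : v ∈ ys := by
      rw [← hys]; exact (PySem.List.mem_sorted l _ false v).mpr hvl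
    have hbl : ys.head hy ∈ l := by
      have h4 := PySem.List.mem_sorted l (fun x => x) false (ys.head hy)
      rw [hys] at h4
      exact h4.mp (List.head_mem hy)
    obtain ⟨p, hp, hpv⟩ := List.getElem_of_mem hvs
    have h1 : ys.head hy ≤ v := by
      rw [List.head_eq_getElem, ← hpv]
      have hmono := PySem.List.sorted_id_getElem_mono l
        (p := 0) (q := p) (by omega) (by rw [hys]; omega)
      simpa [hys] using hmono
    exact le_antisymm (PySem.List.min?_isMin hm _ hbl) h1

-- removing the last element of sorted(l) from l drops the last element of the sort
theorem sorted_erase_getLast (l ys : List Int)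
    (hys : PySem.List.sorted l (fun x => x) false = ys) (hy : ys ≠ []) :
    PySem.List.sorted (l.erase (ys.getLast hy)) (fun x => x) false = ys.dropLast := by
  apply PySem.List.sorted_id_eq_of_perm_of_pairwise
  · have h1 : l.Perm ys := by rw [← hys]; exact (PySem.List.sorted_perm l _ false).symm
    have h2 : ys.Perm (ys.getLast hy :: ys.dropLast) := by
      conv_lhs => rw [← List.dropLast_append_getLast hy]
      exact List.perm_append_comm
    have h3 : (l.erase (ys.getLast hy)).Perm ((ys.getLast hy :: ys.dropLast).erase (ys.getLast hy)) :=
      (h1.trans h2).erase _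
    rw [List.erase_cons_head] at h3
    exact h3.symm
  · have hp : ys.Pairwise (fun a b => a ≤ b) := by
      rw [← hys]; exact PySem.List.sorted_pairwise l (fun x => x)
    exact hp.sublist (List.dropLast_sublist ys)

-- removing the first element of sorted(l) from l drops the head of the sort
theorem sorted_erase_head (l : List Int) (a : Int) (t : List Int)
    (hys : PySem.List.sorted l (fun x => x) false = a :: t) :
    PySem.List.sorted (l.erase a) (fun x => x) false = t := by
  apply PySem.List.sorted_id_eq_of_perm_of_pairwise
  · have h1 : l.Perm (a :: t) := by rw [← hys]; exact (PySem.List.sorted_perm l _ false).symm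
    have h3 := h1.erase a
    rw [List.erase_cons_head] at h3
    exact h3.symm
  · have hp : (a :: t).Pairwise (fun x y => x ≤ y) := by
      rw [← hys]; exact PySem.List.sorted_pairwise l (fun x => x)
    exact (List.pairwise_cons.mp hp).2

-- one double step of the interleave normal form
theorem Fspec_step (a b : Int) (m : List Int) :
    Fspec (a :: (m ++ [b])) = b :: a :: Fspec m := by
  unfold Fspec
  have hrev : (a :: (m ++ [b])).reverse = b :: (m.reverse ++ [a]) := by
    simp
  rw [hrev]
  rw [List.zip_cons_cons]
  rw [List.zip_append (by simp)]
  simp only [List.flatMap_cons, List.flatMap_append, List.zip_cons_cons, List.zip_nil_right,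
    List.flatMap_nil, List.length_cons, List.length_append, List.length_cons, List.length_nil]
  simp only [List.cons_append, List.nil_append]
  rw [List.take_succ_cons, List.take_succ_cons]
  congr 1
  congr 1
  rw [List.take_append_of_le_length (by rw [flat_length]; simp [List.length_zip]; omega)]

-- B's loop computes the interleave normal form of the sorted list.
theorem loopB_eq (n : Nat) : ∀ (l : List Int), l.length ≤ n →
    solveAltLoop l true = Fspec (PySem.List.sorted l (fun x => x) false) := by
  induction n with
  | zero =>
    intro l hlen
    have hl : l = [] := List.length_eq_zero_iff.mp (by omega)
    subst hl
    rw [solveAltLoop]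
    simp [Fspec, PySem.List.sorted]
  | succ n ih =>
    intro l hlen
    by_cases hl : l = []
    · subst hl
      rw [solveAltLoop]
      simp [Fspec, PySem.List.sorted]
    · obtain ⟨s, hs⟩ : ∃ t, PySem.List.sorted l (fun x => x) false = t := ⟨_, rfl⟩
      have hsne : s ≠ [] := by
        rw [← hs, Ne, PySem.List.sorted_eq_nil_iff]; exact hl
      have hmax : PySem.List.max? l (fun y => y) = some (s.getLast hsne) :=
        max_eq_getLast_sorted l s hl hs hsne
      have hbl : s.getLast hsne ∈ l := by
        have h4 := PySem.List.mem_sorted l (fun x => x) false (s.getLast hsne)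
        rw [hs] at h4
        exact h4.mp (List.getLast_mem hsne)
      have step1 : solveAltLoop l true =
          s.getLast hsne :: solveAltLoop (l.erase (s.getLast hsne)) false := by
        rw [solveAltLoop, dif_neg hl]
        simp [hmax, PySem.List.remove?_eq_some_erase l _ hbl]
      have hlel : (l.erase (s.getLast hsne)).length = l.length - 1 :=
        List.length_erase_of_mem hbl
      have hslen : s.length = l.length := by
        rw [← hs]; exact PySem.List.length_sorted l _ false
      by_cases h1 : l.erase (s.getLast hsne) = []
      · -- l has exactly one element
        have hlen1 : l.length = 1 := by
          have hp := List.length_pos_iff.mpr hl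
          have h0 : (l.erase (s.getLast hsne)).length = 0 := by rw [h1]; rfl
          omega
        have hs1 : s.length = 1 := by omega
        obtain ⟨x, hx⟩ := List.length_eq_one_iff.mp hs1
        subst hx
        rw [step1, h1, solveAltLoop, hs]
        simp [Fspec, List.getLast]
      · -- at least two elements
        have hsd : PySem.List.sorted (l.erase (s.getLast hsne)) (fun x => x) false =
            s.dropLast := sorted_erase_getLast l s hs hsne
        have hdl : s.dropLast ≠ [] := by
          have hep : (l.erase (s.getLast hsne)).length ≥ 1 := List.length_pos_iff.mpr h1
          intro hc
          have := congrArg List.length hc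
          simp at this
          omega
        obtain ⟨a0, m, hdm⟩ := List.exists_cons_of_ne_nil hdl
        rw [hdm] at hsd
        have hmin : PySem.List.min? (l.erase (s.getLast hsne)) (fun y => y) = some a0 := by
          have := min_eq_head_sorted (l.erase (s.getLast hsne)) (a0 :: m) h1 hsd (by simp)
          simpa using this
        have hael : a0 ∈ l.erase (s.getLast hsne) := by
          have h4 := PySem.List.mem_sorted (l.erase (s.getLast hsne)) (fun x => x) false a0
          rw [hsd] at h4
          exact h4.mp (by simp)
        have step2 : solveAltLoop (l.erase (s.getLast hsne)) false =
            a0 :: solveAltLoop ((l.erase (s.getLast hsne)).erase a0) true := by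
          rw [solveAltLoop, dif_neg h1]
          simp [hmin, PySem.List.remove?_eq_some_erase _ _ hael]
        have hsd2 : PySem.List.sorted ((l.erase (s.getLast hsne)).erase a0)
            (fun x => x) false = m := by
          exact sorted_erase_head (l.erase (s.getLast hsne)) a0 m hsd
        have hlen2 : ((l.erase (s.getLast hsne)).erase a0).length ≤ n := by
          have := List.length_erase_of_mem hael
          omega
        have hih := ih _ hlen2
        rw [hsd2] at hih
        rw [step1, step2, hih]
        have hdec : s = a0 :: (m ++ [s.getLast hsne]) := by
          conv_lhs => rw [← List.dropLast_append_getLast hsne]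
          rw [hdm]
          rfl
        rw [hs]
        conv_rhs => rw [hdec]
        rw [Fspec_step]

-- ===== VERDICT (by name: the statement is the Claim_ definition above) =====
theorem solve_spec : Claim_equal_solve := by
  intro arr _
  unfold Spec_solve solve solve_alt
  have hlen : (PySem.List.sorted arr (fun x => x) false).length = arr.length :=
    PySem.List.length_sorted arr (fun x => x) false
  have hA := loop_eq (PySem.List.sorted arr (fun x => x) false) arr.length
      (if (arr.length % 2 == 0) then arr.length / 2 else arr.length / 2 + 1)
      (arr.length % 2 == 0) hlen.symm (by rfl) rfl
      ((if (arr.length % 2 == 0) then arr.length / 2 else arr.length / 2 + 1) - 0) 0 rfl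
  simp only [Nat.mul_zero, List.drop_zero] at hA
  rw [hA]
  have hB := loopB_eq arr.length arr le_rfl
  rw [hB]
  unfold Fspec
  rw [hlen]
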